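-- pv_equiv track=rewrite | github.com/nikitakrutoy/ProcessMiningPWC | tools/processmining/miners.py | make_yl_set
-- ===== SOURCE A (Python) =====
-- def make_yl_set(xl):
--     import copy
--     yl = copy.deepcopy(xl)
--     for a in xl:
--         A = a[0]
--         B = a[1]
--         for b in xl:
--
--             if set(A).issubset(b[0]) and set(B).issubset(b[1]):
--                 if a != b:
--                     yl.discard(a)
--     return yl
-- ===== SOURCE B (Python) =====
-- def make_yl_set(xl):
--     # canonicalize each element's pair of tuples to a pair of sorted duplicate-free tuples,
--     # count canonical pairs, compute the maximal canonical pairs once, then filter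
--     from collections import Counter
--     items = list(xl)
--     sps = [(tuple(sorted(set(A))), tuple(sorted(set(B)))) for A, B in items]
--     cnt = Counter(sps)
--     maximal = {p for p in cnt
--                if not any(q != p and set(p[0]) <= set(q[0]) and set(p[1]) <= set(q[1])
--                           for q in cnt)}
--     return {a for a, p in zip(items, sps) if cnt[p] == 1 and p in maximal}
-- ===== Notes on version B (the rewrite author's own statement) =====
-- stated objective: alternative
-- what changed: A repeatedly rebuilds set(A)/set(B) inside a quadratic element-by-element discard loop; B canonicalizes every pair once to sorted duplicate-free tuples, counts canonical pairs with a Counter, computes the maximal pairs in one pass over the DISTINCT canonical pairs only, and keeps an element iff its canonical pair is unique and maximal.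
import Mathlib
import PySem

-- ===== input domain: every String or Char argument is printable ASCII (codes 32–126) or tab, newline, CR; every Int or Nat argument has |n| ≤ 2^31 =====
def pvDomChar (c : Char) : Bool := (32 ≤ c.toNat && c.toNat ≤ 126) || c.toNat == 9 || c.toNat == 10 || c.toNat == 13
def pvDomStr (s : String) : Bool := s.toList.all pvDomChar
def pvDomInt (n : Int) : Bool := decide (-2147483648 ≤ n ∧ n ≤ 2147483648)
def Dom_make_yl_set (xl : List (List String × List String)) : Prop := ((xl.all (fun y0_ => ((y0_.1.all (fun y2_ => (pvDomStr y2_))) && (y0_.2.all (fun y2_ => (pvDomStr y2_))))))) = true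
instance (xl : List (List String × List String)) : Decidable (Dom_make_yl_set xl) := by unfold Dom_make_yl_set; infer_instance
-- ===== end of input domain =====

-- B replaces A's quadratic element-by-element discard loop by canonicalizing each pair to
-- sorted duplicate-free tuples, counting them, computing the maximal canonical pairs once
-- over the DISTINCT pairs, and filtering (objective: alternative decomposition).

-- ===== PORT A =====
def make_yl_set (xl : List (List String × List String)) : List (List String × List String) :=
  -- yl = copy.deepcopy(xl)  (a fresh value; in Lean the same list value)
  let yl := xl
  xl.foldl (fun yl a =>
    let A := a.1
    let B := a.2
    xl.foldl (fun yl b =>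
      if (PySem.Set.ofList A).issubset b.1 && (PySem.Set.ofList B).issubset b.2 then
        if a ≠ b then PySem.Set.discard yl a else yl
      else yl) yl) yl

-- ===== PORT B =====
-- (tuple(sorted(set(A))), tuple(sorted(set(B))))
def pvCanon (ab : List String × List String) : List String × List String :=
  (PySem.List.sorted (PySem.Set.ofList ab.1) (fun x => x),
   PySem.List.sorted (PySem.Set.ofList ab.2) (fun x => x))

def make_yl_set_alt (xl : List (List String × List String)) : List (List String × List String) :=
  let items := xl
  let sps := items.map pvCanon
  let cnt := PySem.Dict.counter sps
  let maximal := PySem.Set.ofList ((PySem.Dict.keys cnt).filter (fun p =>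
    !((PySem.Dict.keys cnt).any (fun q =>
      q ≠ p && (PySem.Set.ofList p.1).issubset q.1 && (PySem.Set.ofList p.2).issubset q.2))))
  PySem.Set.ofList (((items.zip sps).filter
    (fun ap => cnt.getD ap.2 0 == 1 && maximal.contains ap.2)).map (fun ap => ap.1))

-- ===== PRECONDITION & SPEC =====
-- xl is a Python set; its List port therefore carries distinct elements (no narrowing beyond set-ness).
def Pre_make_yl_set (xl : List (List String × List String)) : Prop := xl.Nodup
instance (xl : List (List String × List String)) : Decidable (Pre_make_yl_set xl) := by unfold Pre_make_yl_set; infer_instance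
def pvWitness_make_yl_set : (List (List String × List String)) := [(["a"], ["b"]), ([], ["b"])]

def Spec_make_yl_set (xl : List (List String × List String)) (out : List (List String × List String)) : Prop := out = make_yl_set_alt xl
instance (xl : List (List String × List String)) (out : List (List String × List String)) : Decidable (Spec_make_yl_set xl out) := by unfold Spec_make_yl_set; infer_instance

-- ===== CLAIM (what is proved, stated in full; the proofs are below) =====
def Claim_equal_make_yl_set : Prop := ∀ (xl : List (List String × List String)), Dom_make_yl_set xl → Pre_make_yl_set xl → Spec_make_yl_set xl (make_yl_set xl)

-- ===== LEMMAS AND PROOFS =====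

-- the condition under which A discards a: some other element dominates it
def pvSub (a b : List String × List String) : Bool :=
  (PySem.Set.ofList a.1).issubset b.1 && (PySem.Set.ofList a.2).issubset b.2

def pvBad (xl : List (List String × List String)) (a : List String × List String) : Bool :=
  xl.any (fun b => pvSub a b && a != b)

theorem pvSub_iff (a b : List String × List String) :
    pvSub a b = true ↔ (∀ x ∈ a.1, x ∈ b.1) ∧ (∀ x ∈ a.2, x ∈ b.2) := by
  simp [pvSub, PySem.Set.issubset_iff, PySem.Set.mem_ofList]

theorem discard_discard {α : Type} [BEq α] (s : PySem.Set α) (x : α) :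
    PySem.Set.discard (PySem.Set.discard s x) x = PySem.Set.discard s x := by
  simp [PySem.Set.discard, List.filter_filter]

theorem inner_foldl (a : List String × List String) (l : List (List String × List String))
    (yl : List (List String × List String)) :
    l.foldl (fun yl b =>
      if (PySem.Set.ofList a.1).issubset b.1 && (PySem.Set.ofList a.2).issubset b.2 then
        if a ≠ b then PySem.Set.discard yl a else yl
      else yl) yl
    = if l.any (fun b => pvSub a b && a != b) then PySem.Set.discard yl a else yl := by
  have hfun : (fun (yl : List (List String × List String)) b =>
      if (PySem.Set.ofList a.1).issubset b.1 && (PySem.Set.ofList a.2).issubset b.2 then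
        if a ≠ b then PySem.Set.discard yl a else yl
      else yl)
    = (fun yl b => if pvSub a b then (if a ≠ b then PySem.Set.discard yl a else yl) else yl) := rfl
  rw [hfun]
  induction l generalizing yl with
  | nil => simp
  | cons b l ih =>
    rw [List.foldl_cons, List.any_cons]
    by_cases hs : pvSub a b = true
    · by_cases he : a = b
      · subst he
        rw [if_pos hs, if_neg (by simp : ¬a ≠ a), ih]
        rw [(by simp : (a != a) = false), Bool.and_false, Bool.false_or]
      · rw [if_pos hs, if_pos he, ih]
        have hne : (a != b) = true := by simpa [bne_iff_ne] using he
        rw [hs, hne]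
        by_cases hl : (l.any fun b => pvSub a b && a != b) = true
        · simp [hl, discard_discard]
        · simp [hl]
    · rw [if_neg (by simp [hs]), ih]
      rw [(by simpa using hs : pvSub a b = false), Bool.false_and, Bool.false_or]

theorem foldl_discard_filter {α : Type} [BEq α] [LawfulBEq α] (P : α → Bool)
    (l s : List α) :
    l.foldl (fun yl a => if P a then PySem.Set.discard yl a else yl) s
    = s.filter (fun y => !(l.any (fun a => P a && y == a))) := by
  induction l generalizing s with
  | nil => simp
  | cons a l ih =>
    simp only [List.foldl_cons, ih, List.any_cons]
    by_cases h : P a = true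
    · simp only [h, if_pos]
      rw [PySem.Set.discard, List.filter_filter]
      apply List.filter_congr
      intro y _
      by_cases hy : y = a <;> simp [hy, Bool.and_comm]
    · simp only [h, Bool.false_and]
      apply List.filter_congr
      intro y _
      simp

theorem A_eq_filter (xl : List (List String × List String)) :
    make_yl_set xl = xl.filter (fun y => !pvBad xl y) := by
  unfold make_yl_set
  rw [List.foldl_ext _ (fun yl a => if pvBad xl a then PySem.Set.discard yl a else yl) xl
    (fun yl a _ => by rw [inner_foldl]; rfl)]
  rw [foldl_discard_filter]
  apply List.filter_congr
  intro y hy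
  congr 1
  rw [Bool.eq_iff_iff]
  simp only [List.any_eq_true]
  constructor
  · rintro ⟨b, _, hb⟩
    simp only [Bool.and_eq_true, beq_iff_eq] at hb
    obtain ⟨hbad, rfl⟩ := hb
    exact hbad
  · intro hbad
    exact ⟨y, hy, by simp [hbad]⟩

-- canonical-pair facts
theorem mem_pvCanon1 (X : List String) (x : String) :
    x ∈ PySem.List.sorted (PySem.Set.ofList X) (fun x => x) ↔ x ∈ X := by
  rw [PySem.List.mem_sorted, PySem.Set.mem_ofList]

theorem pvCanon1_eq_iff (X Y : List String) :
    PySem.List.sorted (PySem.Set.ofList X) (fun x => x)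
      = PySem.List.sorted (PySem.Set.ofList Y) (fun x => x)
    ↔ (∀ x, x ∈ X ↔ x ∈ Y) := by
  constructor
  · intro h x
    rw [← mem_pvCanon1 X, ← mem_pvCanon1 Y, h]
  · intro h
    have hperm : (PySem.List.sorted (PySem.Set.ofList X) (fun x => x)).Perm (PySem.Set.ofList Y) := by
      refine ((PySem.List.sorted_perm (PySem.Set.ofList X) (fun x => x) false).trans ?_)
      rw [List.perm_ext_iff_of_nodup (PySem.Set.nodup_ofList X) (PySem.Set.nodup_ofList Y)]
      intro x
      rw [PySem.Set.mem_ofList, PySem.Set.mem_ofList]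
      exact h x
    exact (PySem.List.sorted_eq_of_perm_of_pairwise_lt _ _ _ hperm
      (PySem.List.sorted_ofList_pairwise_lt X)).symm

theorem pvCanon_eq_iff (a b : List String × List String) :
    pvCanon a = pvCanon b ↔ (pvSub a b = true ∧ pvSub b a = true) := by
  simp only [pvCanon, Prod.mk.injEq, pvCanon1_eq_iff, pvSub_iff]
  constructor
  · rintro ⟨h1, h2⟩
    exact ⟨⟨fun x hx => (h1 x).1 hx, fun x hx => (h2 x).1 hx⟩,
           ⟨fun x hx => (h1 x).2 hx, fun x hx => (h2 x).2 hx⟩⟩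
  · rintro ⟨⟨h1, h2⟩, ⟨h3, h4⟩⟩
    exact ⟨fun x => ⟨fun hx => h1 x hx, fun hx => h3 x hx⟩,
           fun x => ⟨fun hx => h2 x hx, fun hx => h4 x hx⟩⟩

theorem pvSub_canon (a b : List String × List String) :
    pvSub (pvCanon a) (pvCanon b) = pvSub a b := by
  rw [Bool.eq_iff_iff, pvSub_iff, pvSub_iff]
  simp only [pvCanon, mem_pvCanon1]

-- B's keep-condition after unfolding the counter and the maximal set
def pvKeepB (xl : List (List String × List String)) (a : List String × List String) : Bool :=
  ((xl.map pvCanon).count (pvCanon a) == 1) &&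
  !((xl.map pvCanon).any (fun q => q ≠ pvCanon a && pvSub (pvCanon a) q))

theorem map_fst_filter_pair {α β : Type} (f : α → β) (p : α × β → Bool) (l : List α) :
    ((l.map (fun a => (a, f a))).filter p).map (fun ap => ap.1)
      = l.filter (fun a => p (a, f a)) := by
  induction l with
  | nil => rfl
  | cons x l ih => by_cases hx : p (x, f x) = true <;> simp [hx, ih]

theorem B_eq_filter (xl : List (List String × List String)) (h : xl.Nodup) :
    make_yl_set_alt xl = xl.filter (pvKeepB xl) := by
  unfold make_yl_set_alt
  dsimp only
  have hzip : xl.zip (xl.map pvCanon) = xl.map (fun a => (a, pvCanon a)) := by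
    simpa using (@List.zip_map' _ _ _ id pvCanon xl)
  rw [hzip, map_fst_filter_pair]
  rw [PySem.Set.ofList_eq_self_of_nodup _ (h.filter _)]
  apply List.filter_congr
  intro a ha
  have hmem : pvCanon a ∈ xl.map pvCanon := List.mem_map_of_mem ha
  rw [pvKeepB, Bool.eq_iff_iff]
  simp only [Bool.and_eq_true]
  constructor
  · rintro ⟨h1, h2⟩
    refine ⟨?_, ?_⟩
    · rw [PySem.Dict.getD_counter] at h1
      simp only [beq_iff_eq] at h1 ⊢
      exact_mod_cast h1
    · rw [PySem.Set.contains, List.contains_iff_mem] at h2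
      rw [PySem.Set.mem_ofList, List.mem_filter] at h2
      obtain ⟨-, hpred⟩ := h2
      simp only [Bool.not_eq_eq_eq_not, Bool.not_true, List.any_eq_false, Bool.not_eq_true]
        at hpred ⊢
      intro q hq
      have := hpred q (by rw [PySem.Dict.keys_counter, PySem.Set.mem_ofList]; exact hq)
      simp only [pvSub, ← Bool.and_assoc]
      exact this
  · rintro ⟨h1, h2⟩
    refine ⟨?_, ?_⟩
    · rw [PySem.Dict.getD_counter]
      simp only [beq_iff_eq] at h1 ⊢
      exact_mod_cast h1
    · rw [PySem.Set.contains, List.contains_iff_mem, PySem.Set.mem_ofList, List.mem_filter]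
      refine ⟨by rw [PySem.Dict.keys_counter, PySem.Set.mem_ofList]; exact hmem, ?_⟩
      simp only [Bool.not_eq_eq_eq_not, Bool.not_true, List.any_eq_false, Bool.not_eq_true]
        at h2 ⊢
      intro q hq
      have := h2 q (by rw [PySem.Dict.keys_counter, PySem.Set.mem_ofList] at hq; exact hq)
      simp only [pvSub, ← Bool.and_assoc] at this
      exact this

-- count characterization under Nodup
theorem count_canon_eq_one_iff (xl : List (List String × List String)) (h : xl.Nodup)
    (a : List String × List String) (ha : a ∈ xl) :
    (xl.map pvCanon).count (pvCanon a) = 1 ↔ ∀ b ∈ xl, pvCanon b = pvCanon a → b = a := by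
  rw [List.count, List.countP_map]
  constructor
  · intro h1 b hb hcb
    by_contra hne
    obtain ⟨s, t, rfl⟩ := List.append_of_mem ha
    have hb' : b ∈ s ∨ b ∈ t := by
      rcases List.mem_append.1 hb with h' | h'
      · exact Or.inl h'
      · rcases List.mem_cons.1 h' with h'' | h''
        · exact absurd h'' hne
        · exact Or.inr h''
    rw [List.countP_append, List.countP_cons] at h1
    have hpa : ((· == pvCanon a) ∘ pvCanon) a = true := by simp
    have hpb : ((· == pvCanon a) ∘ pvCanon) b = true := by simp [hcb]
    rw [hpa, if_pos rfl] at h1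
    rcases hb' with h' | h'
    · have := List.countP_pos_iff.2 ⟨b, h', hpb⟩
      omega
    · have := List.countP_pos_iff.2 ⟨b, h', hpb⟩
      omega
  · intro h1
    have : List.countP ((· == pvCanon a) ∘ pvCanon) xl = List.countP (· == a) xl := by
      apply List.countP_congr
      intro b hb
      simp only [Function.comp, beq_iff_eq]
      constructor
      · exact fun hcb => h1 b hb hcb
      · rintro rfl; rfl
    rw [this, ← List.count]
    exact List.count_eq_one_of_mem h ha

-- main pointwise equivalence
theorem pvBad_false_iff (xl : List (List String × List String)) (a : List String × List String) :
    pvBad xl a = false ↔ ∀ b ∈ xl, pvSub a b = true → a = b := by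
  rw [pvBad, List.any_eq_false]
  constructor
  · intro h b hb hs
    have := h b hb
    rw [hs, Bool.true_and] at this
    simpa [bne_iff_ne] using this
  · intro h b hb
    by_cases hs : pvSub a b = true
    · rw [hs, Bool.true_and]
      simp [h b hb hs]
    · have : pvSub a b = false := by simpa using hs
      simp [this]

theorem pvKeepB_true_iff (xl : List (List String × List String)) (h : xl.Nodup)
    (a : List String × List String) (ha : a ∈ xl) :
    pvKeepB xl a = true ↔
      (∀ b ∈ xl, pvCanon b = pvCanon a → b = a) ∧
      (∀ b ∈ xl, pvCanon b ≠ pvCanon a → pvSub (pvCanon a) (pvCanon b) = false) := by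
  rw [pvKeepB, Bool.and_eq_true, beq_iff_eq, count_canon_eq_one_iff xl h a ha]
  apply and_congr Iff.rfl
  simp only [Bool.not_eq_eq_eq_not, Bool.not_true, List.any_eq_false, Bool.not_eq_true]
  constructor
  · intro h2 b hb hne
    have := h2 (pvCanon b) (List.mem_map_of_mem hb)
    rcases Bool.and_eq_false_iff.1 this with h' | h'
    · exact absurd (by simpa using h') hne
    · exact h'
  · intro h2 q hq
    obtain ⟨b, hb, rfl⟩ := List.mem_map.1 hq
    by_cases hc : pvCanon b = pvCanon a
    · simp [hc]
    · rw [h2 b hb hc, Bool.and_false]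

theorem keep_iff (xl : List (List String × List String)) (h : xl.Nodup)
    (a : List String × List String) (ha : a ∈ xl) :
    pvKeepB xl a = !pvBad xl a := by
  rw [Bool.eq_iff_iff, pvKeepB_true_iff xl h a ha, Bool.not_eq_eq_eq_not, Bool.not_true,
    pvBad_false_iff]
  constructor
  · rintro ⟨h1, h2⟩ b hb hs
    by_cases hc : pvCanon b = pvCanon a
    · exact (h1 b hb hc).symm
    · exfalso
      have := h2 b hb hc
      rw [pvSub_canon] at this
      rw [this] at hs
      simp at hs
  · intro H
    refine ⟨fun b hb hc => ?_, fun b hb hc => ?_⟩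
    · exact (H b hb ((pvCanon_eq_iff b a).1 hc).2).symm
    · by_contra hs
      have hs' : pvSub (pvCanon a) (pvCanon b) = true := by simpa using hs
      rw [pvSub_canon] at hs'
      have hab := H b hb hs'
      exact hc (by rw [← hab])

-- ===== VERDICT (by name: the statement is the Claim_ definition above) =====
theorem make_yl_set_spec : Claim_equal_make_yl_set := by
  intro xl _ hpre
  unfold Spec_make_yl_set
  rw [A_eq_filter, B_eq_filter xl hpre]
  exact List.filter_congr (fun a ha => (keep_iff xl hpre a ha).symm)
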